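-- pv_equiv track=rewrite | github.com/JasmineEllaine/fit1045-python-scrabble | 2-scrabble.py | correctTiles
-- ===== SOURCE A (Python) =====
-- import copy
--
-- def correctTiles(word, tiles):
--     """Checks if a word can be made using the given tiles
--     Args:
--         word (str): word in uppercase
--         tiles (list): list containing tiles in uppercase
--     Returns:
--         True (bool): if word can be made using the given tiles
--         False (bool): otherwise
--     """
--     tilesCopy = copy.deepcopy(tiles)
--     validLetters = 0
--     for letter in word:
--         for tile in tilesCopy:
--             # adds one to the tally of valid letters if tile is a letter in word
--             # removes tile from tile list
--             # breaks out of 2nd loop to compare next letter in word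
--             if tile == letter:
--                 validLetters += 1
--                 tilesCopy.remove(tile)
--                 break
--     if validLetters == len(word):
--         return True
--     return False
-- ===== SOURCE B (Python) =====
-- def correctTiles(word, tiles):
--     """Checks if a word can be made using the given tiles (sort both, then one merge pass)."""
--     sw = sorted(word)
--     st = sorted(tiles)
--     i = j = matched = 0
--     while i < len(sw) and j < len(st):
--         if sw[i] == st[j]:
--             matched += 1
--             i += 1
--             j += 1
--         elif sw[i] > st[j]:
--             j += 1
--         else:
--             i += 1
--     return matched == len(word)
-- ===== Notes on version B (the rewrite author's own statement) =====
-- stated objective: alternative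
-- what changed: Replaces the nested scan-and-remove over a deep copy of the tile list by sorting both the word's letters and the tiles and counting matches in a single two-pointer merge pass.
import Mathlib
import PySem

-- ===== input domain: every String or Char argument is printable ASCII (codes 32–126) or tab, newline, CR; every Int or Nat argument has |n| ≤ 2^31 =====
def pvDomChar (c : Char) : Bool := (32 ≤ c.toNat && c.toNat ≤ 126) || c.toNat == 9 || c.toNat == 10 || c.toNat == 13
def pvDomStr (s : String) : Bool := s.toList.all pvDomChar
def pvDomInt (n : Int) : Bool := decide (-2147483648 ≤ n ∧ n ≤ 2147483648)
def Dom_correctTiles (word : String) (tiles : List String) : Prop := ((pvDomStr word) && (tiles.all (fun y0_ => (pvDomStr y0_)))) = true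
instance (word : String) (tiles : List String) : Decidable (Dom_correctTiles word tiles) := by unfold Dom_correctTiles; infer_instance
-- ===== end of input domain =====

-- B sorts the word's letters and the tiles and counts matches in one two-pointer merge pass,
-- instead of A's nested scan-and-remove over a deep copy of the tile list; return value only
-- (A's copy means neither mutates the caller's list).
-- ===== PORT A =====
-- inner 'for tile in tilesCopy: if tile == letter: remove & break' — returns the list with that tile removed, or none if no tile matched
def pvInnerA (letter : String) : List String → Option (List String)
  | [] => none
  | t :: ts => if t == letter then some ts else (pvInnerA letter ts).map (t :: ·)

-- one iteration of A's outer loop: state = (validLetters, tilesCopy)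
def pvStepA (st : Int × List String) (c : Char) : Int × List String :=
  match pvInnerA (String.ofList [c]) st.2 with
  | some tc => (st.1 + 1, tc)
  | none => st

def correctTiles (word : String) (tiles : List String) : Bool :=
  let st := word.toList.foldl pvStepA (0, tiles)
  if st.1 = (word.toList.length : Int) then true else false

-- ===== PORT B =====
-- the two-pointer while loop of Source B, as recursion on the two sorted lists
-- ('i past the end' = first list exhausted, 'j past the end' = second list exhausted)
def pvMerge : List String → List String → Int
  | [], _ => 0
  | _ :: _, [] => 0
  | a :: as, b :: bs =>
    if a = b then 1 + pvMerge as bs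
    else if b < a then pvMerge (a :: as) bs
    else pvMerge as (b :: bs)

def correctTiles_alt (word : String) (tiles : List String) : Bool :=
  let sw := PySem.List.sorted (word.toList.map (fun c => String.ofList [c])) (fun x => x) false
  let st := PySem.List.sorted tiles (fun x => x) false
  decide (pvMerge sw st = (word.toList.length : Int))

-- ===== PRECONDITION & SPEC =====
def Spec_correctTiles (word : String) (tiles : List String) (out : Bool) : Prop := out = correctTiles_alt word tiles
instance (word : String) (tiles : List String) (out : Bool) : Decidable (Spec_correctTiles word tiles out) := by unfold Spec_correctTiles; infer_instance

-- ===== CLAIM (what is proved, stated in full; the proofs are below) =====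
def Claim_equal_correctTiles : Prop := ∀ (word : String) (tiles : List String), Dom_correctTiles word tiles → Spec_correctTiles word tiles (correctTiles word tiles)

-- ===== LEMMAS AND PROOFS =====
-- A's inner loop is exactly 'remove the first occurrence of letter'
theorem pvInnerA_eq_remove (letter : String) (l : List String) :
    pvInnerA letter l = PySem.List.remove? l letter := by
  induction l with
  | nil => simp [pvInnerA, PySem.List.remove?]
  | cons t ts ih =>
    by_cases h : t = letter
    · subst h; simp [pvInnerA, PySem.List.remove?_cons_self]
    · rw [pvInnerA, if_neg (by simpa using h), ih, PySem.List.remove?_cons_of_ne ts h]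

-- A's matched counter grows by at most one per letter
theorem pvFoldA_le (cs : List Char) (n : Int) (l : List String) :
    (cs.foldl pvStepA (n, l)).1 ≤ n + cs.length := by
  induction cs generalizing n l with
  | nil => simp
  | cons c cs ih =>
    rw [List.foldl_cons]
    rcases h : pvStepA (n, l) c with ⟨n', l'⟩
    have hn' : n' ≤ n + 1 := by
      unfold pvStepA at h
      rcases h' : pvInnerA (String.ofList [c]) l with _ | tc <;> simp [h'] at h <;> omega
    have := ih n' l'
    simp only [List.length_cons]
    push_cast
    omega

-- A matches every letter iff the word's letters form a sub-multiset of the tiles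
theorem pvFoldA_iff (cs : List Char) (n : Int) (l : List String) :
    ((cs.foldl pvStepA (n, l)).1 = n + cs.length)
    ↔ ∀ s, (cs.map (fun c => String.ofList [c])).count s ≤ l.count s := by
  induction cs generalizing n l with
  | nil => simp
  | cons c cs ih =>
    rw [List.foldl_cons]
    by_cases hmem : String.ofList [c] ∈ l
    · have hstep : pvStepA (n, l) c = (n + 1, l.erase (String.ofList [c])) := by
        unfold pvStepA
        rw [pvInnerA_eq_remove, PySem.List.remove?_eq_some_erase l _ hmem]
      rw [hstep]
      have hiff := ih (n + 1) (l.erase (String.ofList [c]))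
      have hcnt : 1 ≤ l.count (String.ofList [c]) := List.count_pos_iff.mpr hmem
      constructor
      · intro h s
        have hc := hiff.mp (by simp only [List.length_cons] at h; push_cast at h ⊢; omega) s
        by_cases hs : s = String.ofList [c]
        · subst hs
          rw [List.count_erase_self] at hc
          simp only [List.map_cons, List.count_cons_self]
          omega
        · rw [List.count_erase_of_ne hs] at hc
          simp only [List.map_cons]
          rw [List.count_cons_of_ne (Ne.symm hs)]
          omega
      · intro h
        have hc : ∀ s, (cs.map (fun c => String.ofList [c])).count s ≤ (l.erase (String.ofList [c])).count s := by
          intro s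
          have h1 := h s
          by_cases hs : s = String.ofList [c]
          · subst hs
            simp only [List.map_cons, List.count_cons_self] at h1
            rw [List.count_erase_self]
            omega
          · simp only [List.map_cons] at h1
            rw [List.count_cons_of_ne (Ne.symm hs)] at h1
            rw [List.count_erase_of_ne hs]
            omega
        have := hiff.mpr hc
        simp only [List.length_cons]
        push_cast
        omega
    · have hstep : pvStepA (n, l) c = (n, l) := by
        unfold pvStepA
        rw [pvInnerA_eq_remove, (PySem.List.remove?_eq_none_iff l _).mpr hmem]
      rw [hstep]
      constructor
      · intro h
        exfalso
        have := pvFoldA_le cs n l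
        simp only [List.length_cons] at h
        push_cast at h
        omega
      · intro h
        exfalso
        have h1 := h (String.ofList [c])
        simp only [List.map_cons, List.count_cons_self] at h1
        rw [List.count_eq_zero_of_not_mem hmem] at h1
        omega

-- the merge counter never exceeds the first list's length
theorem pvMerge_le (as bs : List String) : pvMerge as bs ≤ as.length := by
  induction as generalizing bs with
  | nil => simp [pvMerge]
  | cons a as iha =>
    induction bs with
    | nil => simp only [pvMerge]; positivity
    | cons b bs ihb =>
      rw [pvMerge]
      split_ifs with h1 h2
      · have := iha bs; simp only [List.length_cons]; push_cast; omega
      · have := ihb; simp only [List.length_cons] at *; omega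
      · have := iha (b :: bs); simp only [List.length_cons]; push_cast; omega

-- on sorted lists, the merge matches everything iff the first list is a sub-multiset of the second
theorem pvMerge_iff (as : List String) : ∀ (bs : List String),
    as.Pairwise (· ≤ ·) → bs.Pairwise (· ≤ ·) →
    ((pvMerge as bs = as.length) ↔ ∀ s, as.count s ≤ bs.count s) := by
  induction as with
  | nil => intro bs _ _; simp [pvMerge]
  | cons a as iha =>
    intro bs0 ha hb0
    have ha' : as.Pairwise (· ≤ ·) := (List.pairwise_cons.mp ha).2
    have haHead : ∀ x ∈ as, a ≤ x := (List.pairwise_cons.mp ha).1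
    induction bs0 with
    | nil =>
      rw [pvMerge]
      constructor
      · intro h; exfalso; simp at h; omega
      · intro h
        have h1 := h a
        simp at h1
    | cons b bs ihb =>
      have hb' : bs.Pairwise (· ≤ ·) := (List.pairwise_cons.mp hb0).2
      have hbHead : ∀ x ∈ bs, b ≤ x := (List.pairwise_cons.mp hb0).1
      rw [pvMerge]
      split_ifs with h1 h2
      · -- heads equal: drop both
        subst h1
        have hrec := iha bs ha' hb'
        constructor
        · intro h s
          have hc := hrec.mp (by simp only [List.length_cons] at h; push_cast at h ⊢; omega) s
          by_cases hs : s = a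
          · subst hs; simp only [List.count_cons_self]; omega
          · rw [List.count_cons_of_ne (Ne.symm hs), List.count_cons_of_ne (Ne.symm hs)]; omega
        · intro h
          have hc : ∀ s, as.count s ≤ bs.count s := by
            intro s
            have h1 := h s
            by_cases hs : s = a
            · subst hs; simp only [List.count_cons_self] at h1; omega
            · rw [List.count_cons_of_ne (Ne.symm hs), List.count_cons_of_ne (Ne.symm hs)] at h1; omega
          have := hrec.mpr hc
          simp only [List.length_cons]
          push_cast
          omega
      · -- b < a: b matches nothing in a :: as, so drop it
        constructor
        · intro h s
          have h1 := (ihb hb').mp h s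
          by_cases hs : s = b
          · subst hs; simp only [List.count_cons_self]; omega
          · rw [List.count_cons_of_ne (Ne.symm hs)]; omega
        · intro h
          apply (ihb hb').mpr
          intro s
          have h1 := h s
          by_cases hs : s = b
          · rw [hs]
            have hnb : b ∉ a :: as := by
              intro hmem
              rcases List.mem_cons.mp hmem with h' | h'
              · exact absurd h2 (by rw [h']; exact lt_irrefl _)
              · exact absurd (lt_of_lt_of_le h2 (haHead b h')) (lt_irrefl _)
            rw [List.count_eq_zero_of_not_mem hnb]
            omega
          · rw [List.count_cons_of_ne (Ne.symm hs)] at h1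
            omega
      · -- a < b: a matches nothing in b :: bs; the merge can no longer reach full length
        have hab : a < b := lt_of_le_of_ne (not_lt.mp h2) h1
        constructor
        · intro h
          exfalso
          have := pvMerge_le as (b :: bs)
          simp only [List.length_cons] at h
          push_cast at h
          omega
        · intro h
          exfalso
          have h1' := h a
          have hna : a ∉ b :: bs := by
            intro hmem
            rcases List.mem_cons.mp hmem with h' | h'
            · exact absurd hab (by rw [h']; exact lt_irrefl _)
            · exact absurd (lt_of_lt_of_le hab (hbHead a h')) (lt_irrefl _)
          rw [List.count_eq_zero_of_not_mem hna] at h1'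
          simp only [List.count_cons_self] at h1'
          omega

-- ===== VERDICT (by name: the statement is the Claim_ definition above) =====
theorem correctTiles_spec : Claim_equal_correctTiles := by
  intro word tiles _
  unfold Spec_correctTiles correctTiles correctTiles_alt
  have hlen : ((PySem.List.sorted (word.toList.map (fun c => String.ofList [c])) (fun x => x) false).length : Int)
      = (word.toList.length : Int) := by
    rw [PySem.List.length_sorted, List.length_map]
  have hcond : (pvMerge (PySem.List.sorted (word.toList.map (fun c => String.ofList [c])) (fun x => x) false)
        (PySem.List.sorted tiles (fun x => x) false) = (word.toList.length : Int))
      ↔ ((word.toList.foldl pvStepA (0, tiles)).1 = (word.toList.length : Int)) := by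
    rw [← hlen,
      pvMerge_iff _ _ (PySem.List.sorted_pairwise (word.toList.map (fun c => String.ofList [c])) (fun x => x))
        (PySem.List.sorted_pairwise tiles (fun x => x)), hlen]
    have hA := pvFoldA_iff word.toList 0 tiles
    rw [zero_add] at hA
    rw [hA]
    constructor
    · intro h s
      have h1 := h s
      rwa [(PySem.List.sorted_perm (word.toList.map (fun c => String.ofList [c])) (fun x => x) false).count_eq s,
           (PySem.List.sorted_perm tiles (fun x => x) false).count_eq s] at h1
    · intro h s
      have h1 := h s
      rwa [(PySem.List.sorted_perm (word.toList.map (fun c => String.ofList [c])) (fun x => x) false).count_eq s,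
           (PySem.List.sorted_perm tiles (fun x => x) false).count_eq s]
  by_cases hB : pvMerge (PySem.List.sorted (word.toList.map (fun c => String.ofList [c])) (fun x => x) false)
      (PySem.List.sorted tiles (fun x => x) false) = (word.toList.length : Int)
  · rw [if_pos (hcond.mp hB), decide_eq_true hB]
  · rw [if_neg (fun h => hB (hcond.mpr h)), decide_eq_false hB]
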